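-- pv_equiv track=rewrite | github.com/XieYunshen/Projects | Algorithm1.py | generate_CCM
-- ===== SOURCE A (Python) =====
-- def generate_CCM(part):
--     '''
--     :param part: 即partition
--     :return: 返回嵌套列表形式的矩阵
--     '''
--     n = len(part)
--     M = [([0] * n) for i in range(n)]
--     for i in range(n):
--         for j in range(n):
--             if part[i]==part[j]:
--                 M[i][j]=1
--             else:
--                 M[i][j] = 0
--     return M
-- ===== SOURCE B (Python) =====
-- def generate_CCM(part):
--     rows = {}
--     for v in part:
--         if v not in rows:
--             rows[v] = [1 if u == v else 0 for u in part]
--     return [rows[v] for v in part]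
-- ===== Notes on version B (the rewrite author's own statement) =====
-- stated objective: alternative
-- what changed: Replaces the all-pairs n*n element comparison with one pass that builds a dict caching one 0/1 row per distinct label, then emits each index's cached row.
import Mathlib
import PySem

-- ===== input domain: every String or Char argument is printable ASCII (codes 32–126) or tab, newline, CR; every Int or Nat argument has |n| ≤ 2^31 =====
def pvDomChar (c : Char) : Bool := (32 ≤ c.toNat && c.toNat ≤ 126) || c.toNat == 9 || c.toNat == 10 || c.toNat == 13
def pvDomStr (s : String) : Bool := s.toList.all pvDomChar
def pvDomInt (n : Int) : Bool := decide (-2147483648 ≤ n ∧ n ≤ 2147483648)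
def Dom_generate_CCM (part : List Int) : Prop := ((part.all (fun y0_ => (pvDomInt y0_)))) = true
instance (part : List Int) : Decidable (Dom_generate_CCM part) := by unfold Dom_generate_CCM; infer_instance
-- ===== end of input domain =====

-- B caches one 0/1 row per distinct label in a dict instead of comparing all n*n pairs.

-- ===== PORT A =====
-- pyGetD/pySetD are exact here: every index i,j comes from range(n) so is in range.
def generate_CCM (part : List Int) : List (List Int) :=
  let n : Int := part.length
  let M0 : List (List Int) := (PySem.List.pyRange 0 n 1).map (fun _ => List.replicate n.toNat (0 : Int))
  (PySem.List.pyRange 0 n 1).foldl (fun M i =>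
    (PySem.List.pyRange 0 n 1).foldl (fun M j =>
      if PySem.List.pyGetD part i 0 = PySem.List.pyGetD part j 0 then
        PySem.List.pySetD M i (PySem.List.pySetD (PySem.List.pyGetD M i []) j 1)
      else
        PySem.List.pySetD M i (PySem.List.pySetD (PySem.List.pyGetD M i []) j 0)) M) M0

-- ===== PORT B =====
-- rows.getD v [] is exact: every v of the final map is a key of rows, so the lookup never misses.
def generate_CCM_alt (part : List Int) : List (List Int) :=
  let rows : PySem.Dict Int (List Int) :=
    part.foldl (fun rows v =>
      if rows.contains v = false then
        rows.insert v (part.map (fun u => if u = v then (1 : Int) else 0))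
      else rows) PySem.Dict.empty
  part.map (fun v => rows.getD v [])

-- ===== PRECONDITION & SPEC =====
def Spec_generate_CCM (part : List Int) (out : List (List Int)) : Prop := out = generate_CCM_alt part
instance (part : List Int) (out : List (List Int)) : Decidable (Spec_generate_CCM part out) := by unfold Spec_generate_CCM; infer_instance

-- ===== CLAIM (what is proved, stated in full; the proofs are below) =====
def Claim_equal_generate_CCM : Prop := ∀ (part : List Int), Dom_generate_CCM part → Spec_generate_CCM part (generate_CCM part)

-- ===== LEMMAS AND PROOFS =====

-- canonical form both ports are reduced to
def pvRow (part : List Int) (v : Int) : List Int := part.map (fun u => if u = v then (1 : Int) else 0)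
def pvCCM (part : List Int) : List (List Int) := part.map (fun v => pvRow part v)

-- entry function used for A's proof
def pvE (part : List Int) (i j : Nat) : Int :=
  if part.getD i 0 = part.getD j 0 then 1 else 0

-- shared step: set position m of the untouched tail
lemma append_set_step {α : Type} (f : Nat → α) (m : Nat) (M : List α) (hm : m < M.length) :
    (List.map f (List.range m)) ++ (M.drop m).set (m - (List.map f (List.range m)).length) (f m)
      = List.map f (List.range m ++ [m]) ++ M.drop (m + 1) := by
  have hd : M.drop m = M[m] :: M.drop (m + 1) := List.drop_eq_getElem_cons hm
  simp only [List.length_map, List.length_range, Nat.sub_self, hd, List.set_cons_zero,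
    List.map_append, List.map_cons, List.map_nil, List.cons_append, List.nil_append,
    List.append_assoc]

-- setting every index of a list from the front
lemma foldl_set_range {α : Type} (g : Nat → α) :
    ∀ (k : Nat) (r : List α), k ≤ r.length →
      (List.range k).foldl (fun r j => r.set j (g j)) r = (List.range k).map g ++ r.drop k := by
  intro k
  induction k with
  | zero => simp
  | succ m ih =>
    intro r hr
    rw [List.range_succ, List.foldl_append, ih r (by omega)]
    simp only [List.foldl_cons, List.foldl_nil]
    rw [List.set_append_right _ _ (by simp), append_set_step g m r (by omega)]

-- the inner j-loop only rewrites row i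
lemma inner_fold_eq (ki : Nat) (g : Nat → Int) :
    ∀ (m : Nat) (M : List (List Int)), ki < M.length →
      (List.range m).foldl (fun M kj => M.set ki ((M.getD ki []).set kj (g kj))) M
        = M.set ki ((List.range m).foldl (fun r kj => r.set kj (g kj)) (M.getD ki [])) := by
  intro m
  induction m with
  | zero =>
    intro M h
    simp only [List.range_zero, List.foldl_nil]
    rw [List.getD_eq_getElem _ _ h, List.set_getElem_self]
  | succ m ih =>
    intro M h
    rw [List.range_succ, List.foldl_append, List.foldl_append, ih M h]
    simp only [List.foldl_cons, List.foldl_nil]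
    rw [List.set_set, List.getD_eq_getElem _ _ (by simpa using h), List.getElem_set_self]

-- A's fold body, with the if pushed inside and indices read as naturals
lemma step_eq (part : List Int) (ki : Nat) (M : List (List Int)) (kj : Nat) :
    (if PySem.List.pyGetD part ((ki : Nat) : Int) 0 = PySem.List.pyGetD part ((kj : Nat) : Int) 0 then
        PySem.List.pySetD M ((ki : Nat) : Int) (PySem.List.pySetD (PySem.List.pyGetD M ((ki : Nat) : Int) []) ((kj : Nat) : Int) 1)
      else
        PySem.List.pySetD M ((ki : Nat) : Int) (PySem.List.pySetD (PySem.List.pyGetD M ((ki : Nat) : Int) []) ((kj : Nat) : Int) 0))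
      = M.set ki ((M.getD ki []).set kj (pvE part ki kj)) := by
  simp only [PySem.List.pyGetD_natCast, PySem.List.pySetD_natCast, pvE]
  split <;> rfl

-- after the whole outer loop, row-length-n matrices become the canonical matrix rows
lemma outer_fold_eq (part : List Int) :
    ∀ (k : Nat) (M : List (List Int)), k ≤ M.length → (∀ r ∈ M, r.length = part.length) →
      (List.range k).foldl
          (fun M ki => (List.range part.length).foldl (fun M kj => M.set ki ((M.getD ki []).set kj (pvE part ki kj))) M) M
        = (List.range k).map (fun ki => (List.range part.length).map (pvE part ki)) ++ M.drop k := by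
  intro k
  induction k with
  | zero => simp
  | succ m ih =>
    intro M hk hrows
    rw [List.range_succ, List.foldl_append, ih M (by omega) hrows]
    simp only [List.foldl_cons, List.foldl_nil]
    set X := (List.range m).map (fun ki => (List.range part.length).map (pvE part ki)) ++ M.drop m with hX
    have hm : m < M.length := by omega
    have hXlen : X.length = M.length := by rw [hX]; simp; omega
    have hXget : X.getD m [] = M[m] := by
      rw [hX, List.getD_eq_getElem?_getD, List.getElem?_append_right (by simp)]
      simp [hm]
    have hrowlen : (X.getD m []).length = part.length := by
      rw [hXget]; exact hrows _ (List.getElem_mem hm)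
    rw [inner_fold_eq m (pvE part m) part.length X (by omega)]
    rw [foldl_set_range _ _ _ (by omega)]
    rw [List.drop_eq_nil_of_le (by omega), List.append_nil]
    rw [List.set_append_right _ _ (by simp), append_set_step _ m M hm]

-- A equals the canonical matrix
lemma portA_eq_canon (part : List Int) : generate_CCM part = pvCCM part := by
  simp only [generate_CCM]
  rw [PySem.List.pyRange_zero_natCast]
  simp only [List.foldl_map]
  have hbody : (fun (M : List (List Int)) (ki : Nat) =>
      (List.range part.length).foldl
        (fun M kj =>
          if PySem.List.pyGetD part ((ki : Nat) : Int) 0 = PySem.List.pyGetD part ((kj : Nat) : Int) 0 then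
            PySem.List.pySetD M ((ki : Nat) : Int) (PySem.List.pySetD (PySem.List.pyGetD M ((ki : Nat) : Int) []) ((kj : Nat) : Int) 1)
          else
            PySem.List.pySetD M ((ki : Nat) : Int) (PySem.List.pySetD (PySem.List.pyGetD M ((ki : Nat) : Int) []) ((kj : Nat) : Int) 0)) M)
      = (fun M ki => (List.range part.length).foldl (fun M kj => M.set ki ((M.getD ki []).set kj (pvE part ki kj))) M) := by
    funext M ki
    apply PySem.List.foldl_congr_mem
    intro M' kj _
    exact step_eq part ki M' kj
  rw [hbody]
  rw [outer_fold_eq part part.length _ (by simp) (by intro r hr; simp at hr; obtain ⟨_, _, rfl⟩ := hr; simp)]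
  rw [List.drop_eq_nil_of_le (by simp), List.append_nil]
  unfold pvCCM pvRow pvE
  apply List.ext_getElem (by simp)
  intro i h1 h2
  simp only [List.getElem_map, List.getElem_range]
  apply List.ext_getElem (by simp)
  intro j g1 g2
  simp only [List.getElem_map, List.getElem_range]
  rw [List.getD_eq_getElem part 0 (by simpa using h1), List.getD_eq_getElem part 0 (by simpa using g1)]
  exact if_congr eq_comm rfl rfl


-- B-side proof helpers: the dict-building step, its invariant, and coverage
def pvStep (part : List Int) (d : PySem.Dict Int (List Int)) (v : Int) : PySem.Dict Int (List Int) :=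
  if d.contains v = false then d.insert v (part.map (fun u => if u = v then (1 : Int) else 0)) else d

def pvGood (part : List Int) (d : PySem.Dict Int (List Int)) : Prop :=
  ∀ w, d.contains w = true → d.getD w [] = pvRow part w

lemma pvStep_good (part : List Int) (d : PySem.Dict Int (List Int)) (x : Int)
    (h : pvGood part d) : pvGood part (pvStep part d x) := by
  intro w hw
  unfold pvStep at *
  by_cases hc : d.contains x = false
  · rw [if_pos hc] at hw ⊢
    rw [PySem.Dict.getD_insert]
    split
    · next he => subst he; rfl
    · next he =>
      apply h
      rw [PySem.Dict.contains_insert] at hw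
      simpa [he] using hw
  · rw [if_neg hc] at hw ⊢
    exact h w hw

lemma pvFold_good (part : List Int) (l : List Int) :
    ∀ d, pvGood part d → pvGood part (l.foldl (pvStep part) d) := by
  induction l with
  | nil => intro d h; exact h
  | cons x l ih =>
    intro d h
    rw [List.foldl_cons]
    exact ih _ (pvStep_good part d x h)

lemma pvContains_mono (part : List Int) (l : List Int) :
    ∀ d w, d.contains w = true → (l.foldl (pvStep part) d).contains w = true := by
  induction l with
  | nil => intro d w h; exact h
  | cons x l ih =>
    intro d w h
    rw [List.foldl_cons]
    apply ih
    show (pvStep part d x).contains w = true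
    unfold pvStep
    split
    · rw [PySem.Dict.contains_insert, h]; simp
    · exact h

lemma pvFold_covers (part : List Int) (l : List Int) :
    ∀ d, ∀ v ∈ l, (l.foldl (pvStep part) d).contains v = true := by
  induction l with
  | nil => intro d v hv; cases hv
  | cons x l ih =>
    intro d v hv
    rcases List.mem_cons.mp hv with rfl | hv'
    · rw [List.foldl_cons]
      apply pvContains_mono
      show (pvStep part d v).contains v = true
      unfold pvStep
      split
      · rw [PySem.Dict.contains_insert]; simp
      · next hc => simpa using hc
    · exact ih _ v hv'

-- B equals the canonical matrix
lemma portB_eq_canon (part : List Int) : generate_CCM_alt part = pvCCM part := by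
  have hdef : generate_CCM_alt part
      = part.map (fun v => (part.foldl (pvStep part) PySem.Dict.empty).getD v []) := rfl
  rw [hdef]
  unfold pvCCM
  apply List.map_congr_left
  intro v hv
  exact pvFold_good part part PySem.Dict.empty (by intro w hw; simp at hw) v
    (pvFold_covers part part PySem.Dict.empty v hv)

-- ===== VERDICT (by name: the statement is the Claim_ definition above) =====
theorem generate_CCM_spec : Claim_equal_generate_CCM := by
  intro part _
  unfold Spec_generate_CCM
  rw [portA_eq_canon, portB_eq_canon]
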